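-- pv_equiv track=rewrite | github.com/ishangote/Coding-Interviews-Python | CodeSignal/Arcade/The Core/CreateAnagram.py | createAnagram
-- ===== SOURCE A (Python) =====
-- from collections import defaultdict
--
-- def createAnagram(s, t):
--     # default to 0
--     chars_count = defaultdict(lambda: 0)
--     #Count chars in s
--     for ch in s:
--         chars_count[ch] += 1
--
--     ans = 0
--     for ch in t:
--         #If char is in s then use that or update answer
--         chars_count[ch] -= 1
--         if chars_count[ch] < 0: ans += 1
--
--     return ans
-- ===== SOURCE B (Python) =====
-- def createAnagram(s, t):
--     # Sort both strings and run a two-pointer merge counting matchable pairs;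
--     # the characters of t left unmatched are the ones that must be created.
--     ss = sorted(s)
--     tt = sorted(t)
--     i = j = matched = 0
--     while i < len(ss) and j < len(tt):
--         if ss[i] == tt[j]:
--             matched += 1
--             i += 1
--             j += 1
--         elif ss[i] < tt[j]:
--             i += 1
--         else:
--             j += 1
--     return len(t) - matched
-- ===== Notes on version B (the rewrite author's own statement) =====
-- stated objective: alternative
-- what changed: Replaces A's frequency dictionary (count s, then a streaming decrement loop over t detecting deficits) with sorting both strings and a two-pointer merge that counts matchable character pairs, returning len(t) minus the matches; no counting table is built.
import Mathlib
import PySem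

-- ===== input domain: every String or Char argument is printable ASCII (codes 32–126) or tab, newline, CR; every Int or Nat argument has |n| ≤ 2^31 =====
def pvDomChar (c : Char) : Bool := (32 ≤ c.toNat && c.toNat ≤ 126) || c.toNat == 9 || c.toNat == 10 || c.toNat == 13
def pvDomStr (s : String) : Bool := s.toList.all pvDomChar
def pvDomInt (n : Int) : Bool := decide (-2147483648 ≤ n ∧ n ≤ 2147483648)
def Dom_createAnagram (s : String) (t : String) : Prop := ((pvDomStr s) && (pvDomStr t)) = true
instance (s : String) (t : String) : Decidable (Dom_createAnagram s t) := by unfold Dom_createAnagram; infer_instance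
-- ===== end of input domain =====

-- B replaces A's frequency dictionary (count s, then a streaming decrement loop over t)
-- with sorting both strings and a two-pointer merge counting matchable character pairs,
-- returning len(t) - matches; no counting table is built. Objective: alternative.

-- ===== PORT A =====
-- A's second loop body: chars_count[ch] -= 1; if chars_count[ch] < 0: ans += 1
def pvStepA (p : PySem.Dict Char Int × Int) (ch : Char) : PySem.Dict Char Int × Int :=
  let d := p.1.insert ch (p.1.getD ch 0 - 1)
  (d, if d.getD ch 0 < 0 then p.2 + 1 else p.2)

def createAnagram (s : String) (t : String) : Int :=
  -- chars_count = defaultdict(0); for ch in s: chars_count[ch] += 1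
  let charsCount : PySem.Dict Char Int :=
    s.toList.foldl (fun d ch => d.insert ch (d.getD ch 0 + 1)) PySem.Dict.empty
  -- ans = 0; for ch in t: …
  (t.toList.foldl pvStepA (charsCount, 0)).2

-- ===== PORT B =====
-- B: ss = sorted(s); tt = sorted(t); two-pointer merge counting matches; len(t) - matched.
-- The while loop with indices i, j is transcribed as structural recursion on the two lists,
-- examining the same pair ss[i], tt[j] with the same three branches.
def pvMatch : List Char → List Char → Int
  | _, [] => 0                                   -- j = len(tt): loop exits
  | [], _ :: _ => 0                              -- i = len(ss): loop exits
  | a :: as, b :: bs =>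
      if a = b then 1 + pvMatch as bs            -- matched += 1; i += 1; j += 1
      else if a < b then pvMatch as (b :: bs)    -- i += 1
      else pvMatch (a :: as) bs                  -- j += 1
termination_by ss tt => ss.length + tt.length

def createAnagram_alt (s : String) (t : String) : Int :=
  let ss := PySem.List.sorted s.toList (fun c => c) false   -- ss = sorted(s)
  let tt := PySem.List.sorted t.toList (fun c => c) false   -- tt = sorted(t)
  PySem.Str.len t - pvMatch ss tt                           -- return len(t) - matched

-- ===== PRECONDITION & SPEC =====
def Spec_createAnagram (s : String) (t : String) (out : Int) : Prop := out = createAnagram_alt s t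
instance (s : String) (t : String) (out : Int) : Decidable (Spec_createAnagram s t out) := by unfold Spec_createAnagram; infer_instance

-- ===== CLAIM (what is proved, stated in full; the proofs are below) =====
def Claim_equal_createAnagram : Prop := ∀ (s : String) (t : String), Dom_createAnagram s t → Spec_createAnagram s t (createAnagram s t)

-- ===== LEMMAS AND PROOFS =====

-- loop invariant for A's second loop: the answer it accumulates is the sum, over any
-- finite superset S of t's characters outside of which the dict is nonnegative, of
-- max(count_t c - d[c], 0) - max(-d[c], 0)
theorem pvLoopA_eq (t : List Char) (d : PySem.Dict Char Int) (a : Int) (S : Finset Char)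
    (hS : ∀ c ∈ t, c ∈ S) (hpos : ∀ c, c ∉ S → 0 ≤ d.getD c 0) :
    (t.foldl pvStepA (d, a)).2 =
      a + ∑ c ∈ S, (max ((t.count c : Int) - d.getD c 0) 0 - max (-(d.getD c 0)) 0) := by
  induction t generalizing d a with
  | nil =>
      simp only [List.foldl_nil, List.count_nil]
      have h0 : ∀ c ∈ S, (max (((0 : Nat) : Int) - d.getD c 0) 0 - max (-(d.getD c 0)) 0) = 0 := by
        intro c _; push_cast; omega
      rw [Finset.sum_congr rfl h0]; simp
  | cons ch rest ih =>
      have hch : ch ∈ S := hS ch (List.mem_cons_self ..)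
      rw [List.foldl_cons]
      have hstep : pvStepA (d, a) ch =
          (d.insert ch (d.getD ch 0 - 1),
           if d.getD ch 0 - 1 < 0 then a + 1 else a) := by
        simp [pvStepA, PySem.Dict.getD_insert_self]
      rw [hstep, ih _ _ (fun c hc => hS c (List.mem_cons_of_mem _ hc))
            (by
              intro c hc
              have hne : ¬ c = ch := fun h => hc (h ▸ hch)
              rw [PySem.Dict.getD_insert]
              simpa [hne] using hpos c hc)]
      rw [← Finset.sum_erase_add _ _ hch, ← Finset.sum_erase_add _ _ hch]
      have hcongr : ∀ c ∈ S.erase ch,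
          (max ((rest.count c : Int) - (d.insert ch (d.getD ch 0 - 1)).getD c 0) 0
            - max (-((d.insert ch (d.getD ch 0 - 1)).getD c 0)) 0)
          = (max (((ch :: rest).count c : Int) - d.getD c 0) 0 - max (-(d.getD c 0)) 0) := by
        intro c hc
        have hne : c ≠ ch := Finset.ne_of_mem_erase hc
        rw [PySem.Dict.getD_insert, List.count_cons]
        simp [hne, Ne.symm hne]
      rw [Finset.sum_congr rfl hcongr]
      rw [PySem.Dict.getD_insert_self, List.count_cons_self]
      push_cast
      split_ifs with h <;> omega

-- the two-pointer merge on two sorted lists counts, for each character, the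
-- smaller of its multiplicities (summed over any superset S of tt's characters)
theorem pvMatch_eq (S : Finset Char) : ∀ (ss tt : List Char), ss.Pairwise (· ≤ ·) →
    tt.Pairwise (· ≤ ·) → (∀ c ∈ tt, c ∈ S) →
    pvMatch ss tt = ∑ c ∈ S, min ((ss.count c : Int)) ((tt.count c : Int)) := by
  intro ss tt
  induction ss, tt using pvMatch.induct with
  | case1 ss =>
      intro _ _ _
      have h0 : ∀ c ∈ S, min ((ss.count c : Int)) (((List.nil (α := Char)).count c : Int)) = 0 := by
        intro c _; simp only [List.count_nil, Nat.cast_zero]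
        have : (0:Int) ≤ (ss.count c : Int) := by positivity
        omega
      rw [Finset.sum_congr rfl h0]; simp [pvMatch]
  | case2 b bs =>
      intro _ _ _
      have h0 : ∀ c ∈ S, min (((List.nil (α := Char)).count c : Int)) (((b :: bs).count c : Int)) = 0 := by
        intro c _; simp only [List.count_nil, Nat.cast_zero]
        have : (0:Int) ≤ ((b :: bs).count c : Int) := by positivity
        omega
      rw [Finset.sum_congr rfl h0]; simp [pvMatch]
  | case3 as b bs ih =>
      intro hss htt hS
      have hb : b ∈ S := hS b (List.mem_cons_self ..)
      rw [show pvMatch (b :: as) (b :: bs) = 1 + pvMatch as bs from by simp [pvMatch]]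
      rw [ih hss.tail htt.tail (fun c hc => hS c (List.mem_cons_of_mem _ hc))]
      rw [← Finset.sum_erase_add _ _ hb, ← Finset.sum_erase_add _ _ hb]
      have hcongr : ∀ c ∈ S.erase b,
          min ((as.count c : Int)) ((bs.count c : Int))
            = min (((b :: as).count c : Int)) (((b :: bs).count c : Int)) := by
        intro c hc
        have hne : c ≠ b := Finset.ne_of_mem_erase hc
        rw [List.count_cons, List.count_cons]
        simp [Ne.symm hne]
      rw [Finset.sum_congr rfl hcongr, List.count_cons_self, List.count_cons_self]
      push_cast; omega
  | case4 a as b bs hne hlt ih =>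
      intro hss htt hS
      rw [show pvMatch (a :: as) (b :: bs) = pvMatch as (b :: bs) from by
        simp [pvMatch, hne, hlt]]
      rw [ih hss.tail htt hS]
      refine Finset.sum_congr rfl ?_
      intro c _
      by_cases hc : c = a
      · subst hc
        have hz : (b :: bs).count c = 0 := by
          rw [List.count_eq_zero]
          intro hmem
          rcases List.mem_cons.mp hmem with h | h
          · exact absurd (h ▸ hlt) (lt_irrefl _)
          · exact absurd rfl (ne_of_lt (lt_of_lt_of_le hlt (List.rel_of_pairwise_cons htt h)))
        rw [hz]
        have h1 : (0:Int) ≤ (as.count c : Int) := by positivity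
        rw [List.count_cons_self]
        push_cast; omega
      · rw [show ((a :: as).count c : Int) = (as.count c : Int) from by
          rw [List.count_cons]; simp [Ne.symm hc]]
  | case5 a as b bs hne hnlt ih =>
      intro hss htt hS
      have hba : b < a := lt_of_le_of_ne (le_of_not_gt (by simpa using hnlt)) (fun h => hne h.symm)
      rw [show pvMatch (a :: as) (b :: bs) = pvMatch (a :: as) bs from by
        simp [pvMatch, hne, hnlt]]
      rw [ih hss htt.tail (fun c hc => hS c (List.mem_cons_of_mem _ hc))]
      refine Finset.sum_congr rfl ?_
      intro c _
      by_cases hc : c = b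
      · subst hc
        have hz : (a :: as).count c = 0 := by
          rw [List.count_eq_zero]
          intro hmem
          rcases List.mem_cons.mp hmem with h | h
          · exact absurd (h ▸ hba) (lt_irrefl _)
          · exact absurd rfl (ne_of_lt (lt_of_lt_of_le hba (List.rel_of_pairwise_cons hss h)))
        rw [hz]
        have h1 : (0:Int) ≤ (bs.count c : Int) := by positivity
        have h2 : (0:Int) ≤ ((c :: bs).count c : Int) := by positivity
        push_cast at h1 h2 ⊢; omega
      · rw [show ((b :: bs).count c : Int) = (bs.count c : Int) from by
          rw [List.count_cons]; simp [Ne.symm hc]]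

-- ===== VERDICT (by name: the statement is the Claim_ definition above) =====
theorem createAnagram_spec : Claim_equal_createAnagram := by
  intro s t _
  show createAnagram s t = createAnagram_alt s t
  unfold createAnagram
  simp only [createAnagram_alt]
  rw [PySem.Dict.foldl_insert_getD_add_one_eq_counter]
  have hSdef : ∀ c ∈ PySem.List.sorted t.toList (fun c => c) false,
      c ∈ (PySem.List.dedup t.toList).toFinset := by
    intro c hc
    rw [List.mem_toFinset, PySem.List.mem_dedup]
    exact (PySem.List.mem_sorted _ _ _ _).mp hc
  rw [pvLoopA_eq t.toList _ 0 (PySem.List.dedup t.toList).toFinset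
        (by intro c hc; rw [List.mem_toFinset, PySem.List.mem_dedup]; exact hc)
        (by intro c _; rw [PySem.Dict.getD_counter]; positivity)]
  rw [pvMatch_eq (PySem.List.dedup t.toList).toFinset _ _
        (PySem.List.sorted_pairwise s.toList (fun c => c))
        (PySem.List.sorted_pairwise t.toList (fun c => c)) hSdef]
  have hcs : ∀ c, (PySem.List.sorted s.toList (fun c => c) false).count c = s.toList.count c := by
    intro c; exact (PySem.List.sorted_perm s.toList (fun c => c) false).count_eq c
  have hct : ∀ c, (PySem.List.sorted t.toList (fun c => c) false).count c = t.toList.count c := by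
    intro c; exact (PySem.List.sorted_perm t.toList (fun c => c) false).count_eq c
  have hlen : PySem.Str.len t =
      ∑ c ∈ (PySem.List.dedup t.toList).toFinset, ((t.toList.count c : Int)) := by
    have hfs : (PySem.List.dedup t.toList).toFinset = t.toList.toFinset := by
      ext c; simp [PySem.List.mem_dedup]
    rw [hfs]
    have hnat : ∑ c ∈ t.toList.toFinset, t.toList.count c = t.toList.length := by
      simpa using Multiset.toFinset_sum_count_eq (↑t.toList : Multiset Char)
    have hl : PySem.Str.len t = ((t.toList.length : Nat) : Int) := by simp [PySem.Str.len]
    rw [hl, ← hnat]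
    push_cast
    rfl
  simp only [hcs, hct]
  rw [hlen, ← Finset.sum_sub_distrib, zero_add]
  refine Finset.sum_congr rfl ?_
  intro c _
  rw [PySem.Dict.getD_counter]
  have h1 : (0:Int) ≤ (s.toList.count c : Int) := by positivity
  have h2 : (0:Int) ≤ (t.toList.count c : Int) := by positivity
  omega
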